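-- pv_equiv track=rewrite | github.com/TestSuiteEffectiveness/Semantic-vs-Structural-coverage | Scripts/H_compute_metrics.py | compute_semantic_inclusions
-- ===== SOURCE A (Python) =====
-- def compute_semantic_inclusions(data):
--     """Compute semantic coverage arcs (FC)."""
--     inclusions = []
--     for t1 in data:
--         for t2 in data:
--             if t1 == t2:
--                 continue
--             if all(x in data[t2] for x in data[t1]):
--                 inclusions.append((t1, t2))
--     return inclusions
-- ===== SOURCE B (Python) =====
-- def compute_semantic_inclusions(data):
--     """Compute semantic coverage arcs (FC) via an inverted index + set intersection."""
--     index = {}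
--     for t, vals in data.items():
--         for v in vals:
--             index.setdefault(v, set()).add(t)
--     all_traces = set(data)
--     inclusions = []
--     for t1, vals in data.items():
--         cand = all_traces
--         for v in vals:
--             cand = cand & index.get(v, set())
--         for t2 in data:
--             if t2 != t1 and t2 in cand:
--                 inclusions.append((t1, t2))
--     return inclusions
-- ===== Notes on version B (the rewrite author's own statement) =====
-- stated objective: faster
-- what changed: Instead of testing every ordered pair with a linear 'x in data[t2]' list scan per element, B builds an inverted index from each value to the set of traces containing it, intersects those sets to get each trace's candidate supersets, and emits pairs by iterating t2 in dict order.
import Mathlib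
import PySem

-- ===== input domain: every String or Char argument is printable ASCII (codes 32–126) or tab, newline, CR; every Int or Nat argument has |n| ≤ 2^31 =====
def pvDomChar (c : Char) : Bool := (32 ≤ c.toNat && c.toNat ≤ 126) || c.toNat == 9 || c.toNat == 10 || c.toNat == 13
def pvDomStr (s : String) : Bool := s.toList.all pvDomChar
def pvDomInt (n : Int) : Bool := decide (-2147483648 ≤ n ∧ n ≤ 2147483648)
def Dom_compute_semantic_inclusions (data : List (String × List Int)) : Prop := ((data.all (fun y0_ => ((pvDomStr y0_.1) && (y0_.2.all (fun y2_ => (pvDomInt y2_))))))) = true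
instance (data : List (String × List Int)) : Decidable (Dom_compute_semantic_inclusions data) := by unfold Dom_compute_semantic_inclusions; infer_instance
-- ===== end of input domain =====

-- B replaces A's quadratic pairwise membership rescans by an inverted index (value -> set of
-- traces containing it) intersected per trace; same return value, proved equal below.

-- ===== PORT A =====
-- data[k] (a dict lookup; every key A looks up is a key of the dict)
def csiLookup (data : List (String × List Int)) (k : String) : List Int :=
  (PySem.Dict.mk data).getD k []

def compute_semantic_inclusions (data : List (String × List Int)) : List (String × String) :=
  let keys := data.map (·.1)
  keys.foldl (fun acc t1 =>
    keys.foldl (fun acc t2 =>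
      if t1 == t2 then acc
      else if (csiLookup data t1).all (fun x => (csiLookup data t2).contains x) then
        acc ++ [(t1, t2)]
      else acc) acc) []

-- ===== PORT B =====
-- index.setdefault(v, set()).add(t) over all rows
def csiIndex (data : List (String × List Int)) : PySem.Dict Int (PySem.Set String) :=
  data.foldl (fun d p =>
    p.2.foldl (fun d v => d.modify v PySem.Set.empty (fun s => PySem.Set.add s p.1)) d)
    PySem.Dict.empty

def compute_semantic_inclusions_alt (data : List (String × List Int)) : List (String × String) :=
  let index := csiIndex data
  let allTraces : PySem.Set String := PySem.Set.ofList (data.map (·.1))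
  data.foldl (fun acc p1 =>
    let cand := p1.2.foldl (fun c v => PySem.Set.inter c (index.getD v PySem.Set.empty)) allTraces
    data.foldl (fun acc p2 =>
      if p2.1 != p1.1 && PySem.Set.contains cand p2.1 then acc ++ [(p1.1, p2.1)] else acc)
      acc) []

-- ===== PRECONDITION & SPEC =====
-- Pre_ excludes only association lists with duplicate keys, which do not represent any Python dict
-- (A's argument is a dict, whose keys are necessarily distinct).
def Pre_compute_semantic_inclusions (data : List (String × List Int)) : Prop :=
  (data.map (·.1)).Nodup
instance (data : List (String × List Int)) : Decidable (Pre_compute_semantic_inclusions data) := by unfold Pre_compute_semantic_inclusions; infer_instance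

def pvWitness_compute_semantic_inclusions : (List (String × List Int)) :=
  [("a", [1]), ("b", [1, 2]), ("c", [])]

def Spec_compute_semantic_inclusions (data : List (String × List Int)) (out : List (String × String)) : Prop := out = compute_semantic_inclusions_alt data
instance (data : List (String × List Int)) (out : List (String × String)) : Decidable (Spec_compute_semantic_inclusions data out) := by unfold Spec_compute_semantic_inclusions; infer_instance

-- ===== CLAIM (what is proved, stated in full; the proofs are below) =====
def Claim_equal_compute_semantic_inclusions : Prop := ∀ (data : List (String × List Int)), Dom_compute_semantic_inclusions data → Pre_compute_semantic_inclusions data → Spec_compute_semantic_inclusions data (compute_semantic_inclusions data)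

-- ===== LEMMAS AND PROOFS =====

-- one row of the index build: who ends up in index[v]
theorem csi_mem_index_row (t : String) (vals : List Int)
    (d : PySem.Dict Int (PySem.Set String)) (v : Int) (u : String) :
    u ∈ (vals.foldl (fun d w => d.modify w PySem.Set.empty (fun s => PySem.Set.add s t)) d).getD v PySem.Set.empty ↔
      u ∈ d.getD v PySem.Set.empty ∨ (u = t ∧ v ∈ vals) := by
  induction vals generalizing d with
  | nil => simp
  | cons w ws ih =>
    rw [List.foldl_cons, ih, PySem.Dict.getD_modify]
    by_cases h : v = w
    · subst h
      simp [PySem.Set.mem_add]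
      tauto
    · rw [if_neg h]
      simp only [List.mem_cons]
      tauto

-- the whole index: u ∈ index[v] iff some row (u, vals) of data has v ∈ vals
theorem csi_mem_index_aux (data : List (String × List Int))
    (d : PySem.Dict Int (PySem.Set String)) (v : Int) (u : String) :
    u ∈ (data.foldl (fun d p =>
        p.2.foldl (fun d v => d.modify v PySem.Set.empty (fun s => PySem.Set.add s p.1)) d) d).getD v PySem.Set.empty ↔
      u ∈ d.getD v PySem.Set.empty ∨ ∃ p ∈ data, p.1 = u ∧ v ∈ p.2 := by
  induction data generalizing d with
  | nil => simp
  | cons q qs ih =>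
    rw [List.foldl_cons, ih, csi_mem_index_row]
    simp only [List.mem_cons]
    constructor
    · rintro (⟨h | ⟨rfl, hv⟩⟩ | ⟨p, hp, h1, h2⟩)
      · exact Or.inl h
      · exact Or.inr ⟨q, Or.inl rfl, rfl, hv⟩
      · exact Or.inr ⟨p, Or.inr hp, h1, h2⟩
    · rintro (h | ⟨p, (rfl | hp), h1, h2⟩)
      · exact Or.inl (Or.inl h)
      · exact Or.inl (Or.inr ⟨h1.symm, h2⟩)
      · exact Or.inr ⟨p, hp, h1, h2⟩

theorem csi_mem_index (data : List (String × List Int)) (v : Int) (u : String) :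
    u ∈ (csiIndex data).getD v PySem.Set.empty ↔ ∃ p ∈ data, p.1 = u ∧ v ∈ p.2 := by
  unfold csiIndex
  rw [csi_mem_index_aux]
  simp [PySem.Dict.getD_empty]

-- the candidate set: intersection over vals of index[v], seeded with c
theorem csi_mem_cand (index : PySem.Dict Int (PySem.Set String)) (vals : List Int)
    (c : PySem.Set String) (t : String) :
    t ∈ vals.foldl (fun c v => PySem.Set.inter c (index.getD v PySem.Set.empty)) c ↔
      t ∈ c ∧ ∀ v ∈ vals, t ∈ index.getD v PySem.Set.empty := by
  induction vals generalizing c with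
  | nil => simp
  | cons w ws ih =>
    rw [List.foldl_cons, ih]
    simp [PySem.Set.mem_inter]
    tauto

-- with distinct keys, csiLookup returns the row's own value list
theorem csi_lookup_of_mem (data : List (String × List Int))
    (h : (data.map (·.1)).Nodup) (p : String × List Int) (hp : p ∈ data) :
    csiLookup data p.1 = p.2 := by
  unfold csiLookup
  exact PySem.Dict.getD_of_mem_items (d := PySem.Dict.mk data) (k := p.1) (v := p.2)
    (by simpa using hp) (by simpa [PySem.Dict.keys] using h) []

-- two Bools are equal when their truth conditions agree
theorem csi_bool_ext (a b : Bool) (h : a = true ↔ b = true) : a = b := by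
  cases a <;> cases b <;> simp_all

-- under distinct keys, A's pairwise subset test equals B's candidate-set membership test
theorem csi_cond_eq (data : List (String × List Int)) (h : (data.map (·.1)).Nodup)
    (p1 p2 : String × List Int) (h1 : p1 ∈ data) (h2 : p2 ∈ data) :
    (!(p1.1 == p2.1) && (csiLookup data p1.1).all (fun x => (csiLookup data p2.1).contains x))
      = (p2.1 != p1.1 && PySem.Set.contains
          (p1.2.foldl (fun c v => PySem.Set.inter c ((csiIndex data).getD v PySem.Set.empty))
            (PySem.Set.ofList (data.map (·.1)))) p2.1) := by
  rw [csi_lookup_of_mem data h p1 h1, csi_lookup_of_mem data h p2 h2]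
  apply csi_bool_ext
  simp only [Bool.and_eq_true, bne_iff_ne, Bool.not_eq_eq_eq_not, Bool.not_true,
    beq_eq_false_iff_ne, List.all_eq_true, List.contains_eq_mem, decide_eq_true_eq,
    PySem.Set.contains_iff, csi_mem_cand, PySem.Set.mem_ofList, List.mem_map]
  constructor
  · rintro ⟨hne, hall⟩
    refine ⟨Ne.symm hne, ⟨p2, h2, rfl⟩, fun v hv => ?_⟩
    exact (csi_mem_index data v p2.1).mpr ⟨p2, h2, rfl, hall v hv⟩
  · rintro ⟨hne, -, hall⟩
    refine ⟨Ne.symm hne, fun v hv => ?_⟩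
    obtain ⟨q, hq, hq1, hq2⟩ := (csi_mem_index data v p2.1).mp (hall v hv)
    have : q = p2 := List.inj_on_of_nodup_map h hq h2 hq1
    subst this
    exact hq2

-- ===== VERDICT (by name: the statement is the Claim_ definition above) =====
theorem compute_semantic_inclusions_spec : Claim_equal_compute_semantic_inclusions := by
  intro data _ hpre
  unfold Spec_compute_semantic_inclusions compute_semantic_inclusions compute_semantic_inclusions_alt
  simp only []
  -- A: collapse the nested appends into flatMap of filter+map over the key list
  have hAin : ∀ t1 : String,
      (fun (acc : List (String × String)) t2 =>
        if t1 == t2 then acc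
        else if (csiLookup data t1).all (fun x => (csiLookup data t2).contains x) then
          acc ++ [(t1, t2)] else acc)
      = fun acc t2 =>
        if (!(t1 == t2) && (csiLookup data t1).all (fun x => (csiLookup data t2).contains x)) then
          acc ++ [(t1, t2)] else acc := by
    intro t1
    funext acc t2
    by_cases h : t1 == t2 <;> simp [h]
  have hA : (data.map (·.1)).foldl (fun acc t1 =>
        (data.map (·.1)).foldl (fun acc t2 =>
          if t1 == t2 then acc
          else if (csiLookup data t1).all (fun x => (csiLookup data t2).contains x) then
            acc ++ [(t1, t2)] else acc) acc) []
      = (data.map (·.1)).flatMap (fun t1 =>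
          ((data.map (·.1)).filter (fun t2 =>
            !(t1 == t2) && (csiLookup data t1).all (fun x => (csiLookup data t2).contains x))).map
            (fun t2 => (t1, t2))) := by
    rw [show (fun (acc : List (String × String)) t1 =>
        (data.map (·.1)).foldl (fun acc t2 =>
          if t1 == t2 then acc
          else if (csiLookup data t1).all (fun x => (csiLookup data t2).contains x) then
            acc ++ [(t1, t2)] else acc) acc)
      = fun acc t1 => acc ++ ((data.map (·.1)).filter (fun t2 =>
            !(t1 == t2) && (csiLookup data t1).all (fun x => (csiLookup data t2).contains x))).map
            (fun t2 => (t1, t2)) from by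
        funext acc t1
        rw [hAin t1, PySem.List.foldl_append_if]]
    rw [PySem.List.foldl_append_eq_flatMap]
    simp
  rw [hA]
  -- B: the same collapse over the rows of data
  have hB : data.foldl (fun acc p1 =>
        data.foldl (fun acc p2 =>
          if p2.1 != p1.1 && PySem.Set.contains
              (p1.2.foldl (fun c v => PySem.Set.inter c ((csiIndex data).getD v PySem.Set.empty))
                (PySem.Set.ofList (data.map (·.1)))) p2.1 then
            acc ++ [(p1.1, p2.1)] else acc) acc) []
      = data.flatMap (fun p1 =>
          (data.filter (fun p2 => p2.1 != p1.1 && PySem.Set.contains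
              (p1.2.foldl (fun c v => PySem.Set.inter c ((csiIndex data).getD v PySem.Set.empty))
                (PySem.Set.ofList (data.map (·.1)))) p2.1)).map (fun p2 => (p1.1, p2.1))) := by
    rw [show (fun (acc : List (String × String)) (p1 : String × List Int) =>
        data.foldl (fun acc (p2 : String × List Int) =>
          if p2.1 != p1.1 && PySem.Set.contains
              (p1.2.foldl (fun c v => PySem.Set.inter c ((csiIndex data).getD v PySem.Set.empty))
                (PySem.Set.ofList (data.map (·.1)))) p2.1 then
            acc ++ [(p1.1, p2.1)] else acc) acc)
      = fun acc p1 => acc ++ (data.filter (fun p2 => p2.1 != p1.1 && PySem.Set.contains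
              (p1.2.foldl (fun c v => PySem.Set.inter c ((csiIndex data).getD v PySem.Set.empty))
                (PySem.Set.ofList (data.map (·.1)))) p2.1)).map (fun p2 => (p1.1, p2.1)) from by
        funext acc p1
        rw [PySem.List.foldl_append_if]]
    rw [PySem.List.foldl_append_eq_flatMap]
    simp
  rw [hB]
  -- push A's flatMap/filter from the key list onto the rows of data, then compare pointwise
  rw [List.flatMap_map]
  apply List.flatMap_congr
  intro p1 h1
  rw [List.filter_map, List.map_map]
  apply congrArg
  apply List.filter_congr
  intro p2 h2
  exact csi_cond_eq data hpre p1 p2 h1 h2
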